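-- pv_equiv track=rewrite | github.com/twinklesu/algorithm_py | 2146.py | markingIsland
-- ===== SOURCE A (Python) =====
-- from collections import deque
--
-- dx = [-1, 1, 0, 0]
--
-- dy = [0, 0, -1, 1]
--
-- def markingIsland(mapp, n):
--     q = deque()
--     mark = 1
--     for i in range(n):
--         for j in range(n):
--             if mapp[i][j] == 1:
--                 mark += 1
--                 q.append([i, j])
--                 mapp[i][j] = mark
--                 while q:
--                     x, y = q.popleft() # bfs
--                     for k in range(4):
--                         newX = x + dx[k]
--                         newY = y + dy[k]
--                         if 0<=newX<n and 0<=newY<n and mapp[newX][newY] == 1: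
--                             q.append([newX, newY])
--                             mapp[newX][newY] = mark
--     return mapp
-- ===== SOURCE B (Python) =====
-- def markingIsland(mapp, n):
--     # Recursive depth-first flood fill: on hitting an unvisited 1 in the row-major
--     # scan, fill(x, y, mark) marks the cell and recurses into each in-bounds
--     # neighbour still equal to 1.  The mark of a component is fixed by the outer
--     # scan order, so the traversal order inside a component does not matter.
--     def fill(x, y, mark):
--         mapp[x][y] = mark
--         for nx, ny in ((x - 1, y), (x + 1, y), (x, y - 1), (x, y + 1)):
--             if 0 <= nx < n and 0 <= ny < n and mapp[nx][ny] == 1: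
--                 fill(nx, ny, mark)
--     mark = 1
--     for i in range(n):
--         for j in range(n):
--             if mapp[i][j] == 1:
--                 mark += 1
--                 fill(i, j, mark)
--     return mapp
-- ===== Notes on version B (the rewrite author's own statement) =====
-- stated objective: alternative
-- what changed: Replaces A's iterative BFS with an explicit deque (cells marked as they are enqueued, one popleft per step) by a recursive depth-first fill helper that marks a cell and recurses into its four in-bounds neighbours still equal to 1; the component's mark is fixed by the outer row-major scan, so traversal order inside a component does not matter.
import Mathlib
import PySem

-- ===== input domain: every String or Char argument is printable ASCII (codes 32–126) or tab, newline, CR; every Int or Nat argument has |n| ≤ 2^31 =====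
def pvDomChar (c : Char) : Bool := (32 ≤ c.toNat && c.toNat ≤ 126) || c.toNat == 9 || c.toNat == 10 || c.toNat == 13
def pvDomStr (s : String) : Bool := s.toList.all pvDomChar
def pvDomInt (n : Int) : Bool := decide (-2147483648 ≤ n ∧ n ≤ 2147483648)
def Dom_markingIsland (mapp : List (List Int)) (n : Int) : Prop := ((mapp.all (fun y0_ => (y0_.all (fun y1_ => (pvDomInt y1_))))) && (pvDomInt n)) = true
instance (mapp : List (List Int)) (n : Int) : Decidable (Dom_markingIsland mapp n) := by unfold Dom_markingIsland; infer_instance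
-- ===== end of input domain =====

-- B replaces A's iterative BFS deque by a recursive depth-first fill of each component
-- (objective: alternative; both mutate `mapp` in place in Python — the equivalence
-- proved here is about the return value).

-- ===== PORT A =====

-- mapp[i][j] (both indices are nonnegative wherever the programs read; pyGetD is exact there)
def getCell (g : List (List Int)) (x y : Int) : Int :=
  PySem.List.pyGetD (PySem.List.pyGetD g x []) y 0

-- mapp[x][y] = v
def setCell (g : List (List Int)) (x y v : Int) : List (List Int) :=
  PySem.List.pySetD g x (PySem.List.pySetD (PySem.List.pyGetD g x []) y v)

-- dx / dy module constants
def dxL : List Int := [-1, 1, 0, 0]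
def dyL : List Int := [0, 0, -1, 1]

-- 0<=newX<n and 0<=newY<n
-- reducible so that `if inb n d ∧ …` finds its Decidable instance without a declared instance
abbrev inb (n : Int) (c : Int × Int) : Prop := 0 ≤ c.1 ∧ c.1 < n ∧ 0 ≤ c.2 ∧ c.2 < n

-- number of cells equal to 1 (fuel bound for A's while-loop and B's recursion; a totality guard, not part of either Python's logic)
def ones (g : List (List Int)) : Nat := (g.map (fun r => r.count 1)).sum

-- the 'while q:' loop of A, one popleft per recursive call; fuel only makes it total
def bfsF (n mark : Int) : Nat → List (List Int) → List (Int × Int) → List (List Int)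
  | 0, g, _ => g
  | _ + 1, g, [] => g
  | fuel + 1, g, c :: rest =>
      let st := (PySem.List.pyRange 0 4 1).foldl
        (fun (st : List (List Int) × List (Int × Int)) k =>
          let newX := c.1 + PySem.List.pyGetD dxL k 0
          let newY := c.2 + PySem.List.pyGetD dyL k 0
          if inb n (newX, newY) ∧ getCell st.1 newX newY = 1 then
            (setCell st.1 newX newY mark, st.2 ++ [(newX, newY)])
          else st)
        (g, rest)
      bfsF n mark fuel st.1 st.2

def markingIsland (mapp : List (List Int)) (n : Int) : List (List Int) :=
  ((PySem.List.pyRange 0 n 1).foldl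
    (fun (st : List (List Int) × Int) i =>
      (PySem.List.pyRange 0 n 1).foldl
        (fun (st : List (List Int) × Int) j =>
          if getCell st.1 i j = 1 then
            let mark := st.2 + 1
            let g1 := setCell st.1 i j mark
            (bfsF n mark (5 * ones g1 + 2) g1 [(i, j)], mark)
          else st)
        st)
    (mapp, 1)).1

-- ===== PORT B =====

-- ((x-1,y),(x+1,y),(x,y-1),(x,y+1))
def nbrs (c : Int × Int) : List (Int × Int) :=
  [(c.1 - 1, c.2), (c.1 + 1, c.2), (c.1, c.2 - 1), (c.1, c.2 + 1)]

-- the recursive helper 'fill(x, y, mark)': set the cell, then recurse into each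
-- in-bounds neighbour still equal to 1; fuel only makes it total
def fillF (n mark : Int) : Nat → List (List Int) → Int × Int → List (List Int)
  | 0, g, _ => g
  | fuel + 1, g, c =>
      (nbrs c).foldl
        (fun g d =>
          if inb n d ∧ getCell g d.1 d.2 = 1 then fillF n mark fuel g d else g)
        (setCell g c.1 c.2 mark)

def markingIsland_alt (mapp : List (List Int)) (n : Int) : List (List Int) :=
  ((PySem.List.pyRange 0 n 1).foldl
    (fun (st : List (List Int) × Int) i =>
      (PySem.List.pyRange 0 n 1).foldl
        (fun (st : List (List Int) × Int) j =>
          if getCell st.1 i j = 1 then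
            (fillF n (st.2 + 1) (ones st.1 + 1) st.1 (i, j), st.2 + 1)
          else st)
        st)
    (mapp, 1)).1

-- ===== PRECONDITION & SPEC =====

-- Pre_ excludes exactly the inputs on which Python A raises IndexError: the scan reads
-- mapp[i][j] for all 0 ≤ i, j < n, so it needs at least n rows whose first n rows each
-- have length ≥ n.
def Pre_markingIsland (mapp : List (List Int)) (n : Int) : Prop :=
  n ≤ (mapp.length : Int) ∧ ∀ r ∈ mapp.take n.toNat, n ≤ (r.length : Int)

instance (mapp : List (List Int)) (n : Int) : Decidable (Pre_markingIsland mapp n) := by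
  unfold Pre_markingIsland; infer_instance

def pvWitness_markingIsland : List (List Int) × Int := ([[1, 0, 1], [1, 1, 0], [0, 0, 1]], 3)

def Spec_markingIsland (mapp : List (List Int)) (n : Int) (out : List (List Int)) : Prop := out = markingIsland_alt mapp n
instance (mapp : List (List Int)) (n : Int) (out : List (List Int)) : Decidable (Spec_markingIsland mapp n out) := by unfold Spec_markingIsland; infer_instance

-- ===== CLAIM (what is proved, stated in full; the proofs are below) =====
def Claim_equal_markingIsland : Prop := ∀ (mapp : List (List Int)) (n : Int), Dom_markingIsland mapp n → Pre_markingIsland mapp n → Spec_markingIsland mapp n (markingIsland mapp n)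

-- ===== LEMMAS AND PROOFS =====

-- value at Nat position (0 outside the grid)
def val (g : List (List Int)) (i j : Nat) : Int := (g.getD i []).getD j 0

def inGrid (g : List (List Int)) (i j : Nat) : Prop := i < g.length ∧ j < (g.getD i []).length

-- cell-level views (cells with nonnegative coordinates)
def cval (g : List (List Int)) (c : Int × Int) : Int := getCell g c.1 c.2

def oneAt (n : Int) (g : List (List Int)) (c : Int × Int) : Prop := inb n c ∧ cval g c = 1

-- reachability through cells satisfying p, starting at s
inductive RP (p : Int × Int → Prop) (s : Int × Int) : (Int × Int) → Prop
  | refl : RP p s s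
  | step {c d : Int × Int} : RP p s c → d ∈ nbrs c → p d → RP p s d

-- overwrite every position of S with m (spec-side only)
noncomputable def setAll (g : List (List Int)) (S : Int × Int → Prop) (m : Int) : List (List Int) :=
  g.mapIdx (fun i row => row.mapIdx (fun j v =>
    @ite _ (S ((i : Int), (j : Int))) (Classical.propDecidable _) m v))

theorem getCell_eq_val (g : List (List Int)) {x y : Int} (hx : 0 ≤ x) (hy : 0 ≤ y) :
    getCell g x y = val g x.toNat y.toNat := by
  unfold getCell val
  rw [PySem.List.pyGetD_of_nonneg _ _ hx, PySem.List.pyGetD_of_nonneg _ _ hy]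

theorem val_one_inGrid {g : List (List Int)} {i j : Nat} (h : val g i j ≠ 0) : inGrid g i j := by
  unfold val at h
  by_cases hi : i < g.length
  · refine ⟨hi, ?_⟩
    by_cases hj : j < (g.getD i []).length
    · exact hj
    · exact absurd (List.getD_eq_default _ _ (Nat.le_of_not_lt hj)) h
  · rw [List.getD_eq_default _ _ (Nat.le_of_not_lt hi)] at h
    simp at h

theorem setCell_eq_set {g : List (List Int)} {x y v : Int} (hx : 0 ≤ x) (hy : 0 ≤ y) :
    setCell g x y v = g.set x.toNat ((g.getD x.toNat []).set y.toNat v) := by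
  unfold setCell
  rw [PySem.List.pySetD_of_nonneg _ _ hx, PySem.List.pySetD_of_nonneg _ _ hy,
    PySem.List.pyGetD_of_nonneg _ _ hx]

theorem length_setAll (g : List (List Int)) (S : Int × Int → Prop) (m : Int) :
    (setAll g S m).length = g.length := by
  unfold setAll; simp

theorem getD_setAll (g : List (List Int)) (S : Int × Int → Prop) (m : Int) (i : Nat) :
    (setAll g S m).getD i [] = (g.getD i []).mapIdx (fun j v =>
      @ite _ (S ((i : Int), (j : Int))) (Classical.propDecidable _) m v) := by
  by_cases hi : i < g.length
  · rw [List.getD_eq_getElem _ _ (by simpa [setAll] using hi), List.getD_eq_getElem _ _ hi]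
    unfold setAll
    simp
  · rw [List.getD_eq_default _ _ (by simpa [setAll] using Nat.le_of_not_lt hi),
      List.getD_eq_default _ _ (Nat.le_of_not_lt hi)]
    simp

theorem getD_row_default {g : List (List Int)} {i : Nat} (hi : ¬ i < g.length) :
    g.getD i [] = [] := List.getD_eq_default _ _ (Nat.le_of_not_lt hi)

theorem row_setAll (g : List (List Int)) (S : Int × Int → Prop) (m : Int) (i : Nat) :
    ((setAll g S m).getD i []).length = (g.getD i []).length := by
  rw [getD_setAll]; simp

theorem val_setAll (g : List (List Int)) (S : Int × Int → Prop) (m : Int) (i j : Nat) :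
    val (setAll g S m) i j = @ite _ (inGrid g i j ∧ S ((i : Int), (j : Int))) (Classical.propDecidable _) m (val g i j) := by
  unfold val
  rw [getD_setAll]
  by_cases hi : i < g.length
  · by_cases hj : j < (g.getD i []).length
    · rw [List.getD_eq_getElem _ _ (by simpa using hj), List.getD_eq_getElem _ _ hj]
      rw [List.getElem_mapIdx]
      by_cases hS : S ((i : Int), (j : Int))
      · rw [if_pos hS, if_pos ⟨⟨hi, hj⟩, hS⟩]
      · rw [if_neg hS, if_neg (fun h => hS h.2)]
    · rw [List.getD_eq_default _ _ (by simpa using Nat.le_of_not_lt hj),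
        List.getD_eq_default _ _ (Nat.le_of_not_lt hj),
        if_neg (fun h => hj h.1.2)]
  · rw [if_neg (fun h => hi h.1.1), getD_row_default hi]
    simp

theorem grid_ext {g1 g2 : List (List Int)} (h1 : g1.length = g2.length)
    (h2 : ∀ i, (g1.getD i []).length = (g2.getD i []).length)
    (h3 : ∀ i j, val g1 i j = val g2 i j) : g1 = g2 := by
  refine List.ext_getElem h1 (fun i hi1 hi2 => ?_)
  have hr : (g1.getD i []).length = (g2.getD i []).length := h2 i
  rw [List.getD_eq_getElem _ _ hi1, List.getD_eq_getElem _ _ hi2] at hr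
  refine List.ext_getElem hr (fun j hj1 hj2 => ?_)
  have := h3 i j
  unfold val at this
  rw [List.getD_eq_getElem _ _ hi1, List.getD_eq_getElem _ _ hi2,
    List.getD_eq_getElem _ _ hj1, List.getD_eq_getElem _ _ hj2] at this
  exact this

theorem setAll_congr {g : List (List Int)} {S T : Int × Int → Prop} {m : Int}
    (h : ∀ i j : Nat, inGrid g i j → ((S ((i : Int), (j : Int)) ↔ T ((i : Int), (j : Int))) ∨ val g i j = m)) :
    setAll g S m = setAll g T m := by
  refine grid_ext (by rw [length_setAll, length_setAll]) (fun i => by rw [row_setAll, row_setAll]) ?_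
  intro i j
  rw [val_setAll, val_setAll]
  by_cases hg : inGrid g i j
  · rcases h i j hg with hiff | hv
    · by_cases hS : S ((i : Int), (j : Int))
      · rw [if_pos ⟨hg, hS⟩, if_pos ⟨hg, hiff.mp hS⟩]
      · rw [if_neg (fun hc => hS hc.2), if_neg (fun hc => hS (hiff.mpr hc.2))]
    · split <;> split <;> simp [hv]
  · rw [if_neg (fun hc => hg hc.1), if_neg (fun hc => hg hc.1)]

theorem setAll_empty {g : List (List Int)} {S : Int × Int → Prop} {m : Int}
    (h : ∀ c, ¬ S c) : setAll g S m = g := by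
  refine grid_ext (length_setAll g S m) (row_setAll g S m) (fun i j => ?_)
  rw [val_setAll, if_neg (fun hc => h _ hc.2)]

theorem inGrid_setAll {g : List (List Int)} {S : Int × Int → Prop} {m : Int} {i j : Nat} :
    inGrid (setAll g S m) i j ↔ inGrid g i j := by
  unfold inGrid
  rw [length_setAll, row_setAll]

theorem setAll_comp (g : List (List Int)) (S T : Int × Int → Prop) (m : Int) :
    setAll (setAll g S m) T m = setAll g (fun c => S c ∨ T c) m := by
  refine grid_ext (by rw [length_setAll, length_setAll, length_setAll])
    (fun i => by rw [row_setAll, row_setAll, row_setAll]) (fun i j => ?_)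
  rw [val_setAll, val_setAll, val_setAll]
  by_cases hg : inGrid g i j
  · by_cases hT : T ((i : Int), (j : Int))
    · rw [if_pos ⟨inGrid_setAll.mpr hg, hT⟩, if_pos ⟨hg, Or.inr hT⟩]
    · rw [if_neg (fun hc => hT hc.2)]
      by_cases hS : S ((i : Int), (j : Int))
      · rw [if_pos ⟨hg, hS⟩, if_pos ⟨hg, Or.inl hS⟩]
      · rw [if_neg (fun hc => hS hc.2), if_neg (fun hc => hc.2.elim hS hT)]
  · rw [if_neg (fun hc => hg (inGrid_setAll.mp hc.1)), if_neg (fun hc => hg hc.1),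
      if_neg (fun hc => hg hc.1)]

theorem sum_set_nat : ∀ (l : List Nat) (i : Nat), i < l.length → ∀ k, (l.set i k).sum + l.getD i 0 = l.sum + k := by
  intro l
  induction l with
  | nil => intro i hi; simp at hi
  | cons a t ih =>
    intro i hi k
    cases i with
    | zero => simp [List.set]; omega
    | succ i =>
      simp only [List.set, List.sum_cons, List.getD_cons_succ]
      have := ih i (by simpa using hi) k
      omega

theorem count_set_one : ∀ (l : List Int) (j : Nat) (m : Int), j < l.length → l.getD j 0 = 1 → m ≠ 1 →
    ((l.set j m).count 1) + 1 = l.count 1 := by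
  intro l
  induction l with
  | nil => intro j m hj; simp at hj
  | cons a t ih =>
    intro j m hj h1 hm
    cases j with
    | zero =>
      simp only [List.getD_cons_zero] at h1
      subst h1
      simp [List.set, hm]
    | succ j =>
      simp only [List.set, List.count_cons]
      have := ih j m (by simpa using hj) (by simpa using h1) hm
      split <;> omega

theorem length_setCell {g : List (List Int)} {x y v : Int} (hx : 0 ≤ x) (hy : 0 ≤ y) :
    (setCell g x y v).length = g.length := by
  rw [setCell_eq_set hx hy, List.length_set]

theorem getD_set' {α : Type} [Inhabited α] (l : List α) (a : Nat) (r : α) (i : Nat) :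
    (l.set a r).getD i default =
      @ite _ (i = a ∧ a < l.length) (Classical.propDecidable _) r (l.getD i default) := by
  rw [List.getD_eq_getElem?_getD, List.getD_eq_getElem?_getD, List.getElem?_set]
  by_cases h1 : a = i
  · subst h1
    by_cases h2 : a < l.length
    · rw [if_pos rfl, if_pos h2, if_pos ⟨rfl, h2⟩]
      rfl
    · rw [if_pos rfl, if_neg h2, if_neg (fun hc => h2 hc.2)]
      rw [List.getElem?_eq_none (by omega)]
  · rw [if_neg h1, if_neg (fun hc => h1 hc.1.symm)]

theorem row_setCell {g : List (List Int)} {x y v : Int} (hx : 0 ≤ x) (hy : 0 ≤ y) (i : Nat) :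
    ((setCell g x y v).getD i []).length = (g.getD i []).length := by
  rw [setCell_eq_set hx hy]
  have : ([] : List Int) = default := rfl
  rw [this, getD_set' g x.toNat _ i]
  by_cases hc : i = x.toNat ∧ x.toNat < g.length
  · rw [if_pos hc, List.length_set, hc.1]
  · rw [if_neg hc]

theorem val_setCell {g : List (List Int)} {x y v : Int} (hx : 0 ≤ x) (hy : 0 ≤ y) (i j : Nat) :
    val (setCell g x y v) i j =
      @ite _ (i = x.toNat ∧ j = y.toNat ∧ inGrid g i j) (Classical.propDecidable _) v (val g i j) := by
  rw [setCell_eq_set hx hy]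
  unfold val inGrid
  have hd : ([] : List Int) = default := rfl
  have hd0 : (0 : Int) = default := rfl
  rw [hd, hd0, getD_set' g x.toNat _ i]
  by_cases hc1 : i = x.toNat ∧ x.toNat < g.length
  · rw [if_pos hc1, getD_set' (g.getD x.toNat default) y.toNat v j]
    by_cases hc2 : j = y.toNat ∧ y.toNat < (g.getD x.toNat default).length
    · rw [if_pos hc2, if_pos ⟨hc1.1, hc2.1, by rw [hc1.1]; exact hc1.2, by rw [hc1.1, hc2.1]; exact hc2.2⟩]
    · rw [if_neg hc2, if_neg (fun hc => hc2 ⟨hc.2.1, by rw [← hc.2.1, ← hc.1]; exact hc.2.2.2⟩), hc1.1]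
  · rw [if_neg hc1, if_neg (fun hc => hc1 ⟨hc.1, by rw [← hc.1]; exact hc.2.2.1⟩)]

theorem setCell_eq_setAll {g : List (List Int)} {x y v : Int} (hx : 0 ≤ x) (hy : 0 ≤ y) :
    setCell g x y v = setAll g (fun c => c = (x, y)) v := by
  refine grid_ext (by rw [length_setCell hx hy, length_setAll])
    (fun i => by rw [row_setCell hx hy, row_setAll]) (fun i j => ?_)
  rw [val_setCell hx hy, val_setAll]
  by_cases hc : i = x.toNat ∧ j = y.toNat ∧ inGrid g i j
  · rw [if_pos hc, if_pos ⟨hc.2.2, by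
      obtain ⟨h1, h2, _⟩ := hc
      subst h1; subst h2
      simp [Int.toNat_of_nonneg hx, Int.toNat_of_nonneg hy]⟩]
  · rw [if_neg hc, if_neg ?_]
    intro ⟨hg, he⟩
    apply hc
    have h1 : (i : Int) = x := congrArg Prod.fst he
    have h2 : (j : Int) = y := congrArg Prod.snd he
    exact ⟨by omega, by omega, hg⟩

theorem cval_setAll {g : List (List Int)} {S : Int × Int → Prop} {m : Int} {c : Int × Int}
    (hx : 0 ≤ c.1) (hy : 0 ≤ c.2) :
    cval (setAll g S m) c = @ite _ (inGrid g c.1.toNat c.2.toNat ∧ S c) (Classical.propDecidable _) m (cval g c) := by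
  unfold cval
  rw [getCell_eq_val _ hx hy, getCell_eq_val _ hx hy, val_setAll]
  have hS : S ((c.1.toNat : Int), (c.2.toNat : Int)) ↔ S c := by
    rw [Int.toNat_of_nonneg hx, Int.toNat_of_nonneg hy]
  by_cases hc : inGrid g c.1.toNat c.2.toNat ∧ S c
  · rw [if_pos ⟨hc.1, hS.mpr hc.2⟩, if_pos hc]
  · rw [if_neg (fun h => hc ⟨h.1, hS.mp h.2⟩), if_neg hc]

theorem oneAt_setAll {n : Int} {g : List (List Int)} {S : Int × Int → Prop} {m : Int} {c : Int × Int}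
    (hm : m ≠ 1) : oneAt n (setAll g S m) c ↔ oneAt n g c ∧ ¬ S c := by
  unfold oneAt
  constructor
  · rintro ⟨hinb, h1⟩
    have hx := hinb.1
    have hy := hinb.2.2.1
    rw [cval_setAll hx hy] at h1
    by_cases hc : inGrid g c.1.toNat c.2.toNat ∧ S c
    · rw [if_pos hc] at h1; exact absurd h1 hm
    · rw [if_neg hc] at h1
      refine ⟨⟨hinb, h1⟩, fun hS => hc ⟨?_, hS⟩⟩
      have hval : val g c.1.toNat c.2.toNat = 1 := by
        rw [← getCell_eq_val _ hx hy]; exact h1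
      exact val_one_inGrid (by rw [hval]; omega)
  · rintro ⟨⟨hinb, h1⟩, hS⟩
    have hx := hinb.1
    have hy := hinb.2.2.1
    refine ⟨hinb, ?_⟩
    rw [cval_setAll hx hy, if_neg (fun hc => hS hc.2)]
    exact h1

theorem setCell_eq_setAll' {g : List (List Int)} {c : Int × Int} {v : Int}
    (hx : 0 ≤ c.1) (hy : 0 ≤ c.2) : setCell g c.1 c.2 v = setAll g (fun d => d = c) v := by
  rw [setCell_eq_setAll hx hy]

def oneCell (g : List (List Int)) (c : Int × Int) : Prop := 0 ≤ c.1 ∧ 0 ≤ c.2 ∧ cval g c = 1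

theorem ones_setCell {g : List (List Int)} {c : Int × Int} {m : Int} (hm : m ≠ 1)
    (h : oneCell g c) : ones (setCell g c.1 c.2 m) + 1 = ones g := by
  obtain ⟨hx, hy, h1⟩ := h
  have hval : val g c.1.toNat c.2.toNat = 1 := by
    unfold cval at h1; rw [getCell_eq_val _ hx hy] at h1; exact h1
  have hg : inGrid g c.1.toNat c.2.toNat := val_one_inGrid (by rw [hval]; omega)
  unfold ones
  rw [setCell_eq_set hx hy, List.map_set]
  have hs := sum_set_nat (g.map (fun r => r.count 1)) c.1.toNat
    (by simpa using hg.1) (((g.getD c.1.toNat []).set c.2.toNat m).count 1)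
  have hgd : (g.map (fun r => r.count 1)).getD c.1.toNat 0 = (g.getD c.1.toNat []).count 1 := by
    rw [List.getD_eq_getElem _ _ (by simpa using hg.1), List.getElem_map]
    exact congrArg (List.count 1) (List.getD_eq_getElem _ _ hg.1).symm
  rw [hgd] at hs
  have hcnt := count_set_one (g.getD c.1.toNat []) c.2.toNat m hg.2 hval hm
  omega

theorem cval_setCell_ne {g : List (List Int)} {c d : Int × Int} {v : Int}
    (hc : 0 ≤ c.1 ∧ 0 ≤ c.2) (hd : 0 ≤ d.1 ∧ 0 ≤ d.2) (hne : d ≠ c) :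
    cval (setCell g c.1 c.2 v) d = cval g d := by
  unfold cval
  rw [getCell_eq_val _ hd.1 hd.2, getCell_eq_val _ hd.1 hd.2, val_setCell hc.1 hc.2]
  rw [if_neg ?_]
  rintro ⟨h1, h2, _⟩
  apply hne
  have e1 : d.1 = c.1 := by omega
  have e2 : d.2 = c.2 := by omega
  exact Prod.ext e1 e2

theorem cval_setCell_self {g : List (List Int)} {c : Int × Int} {v : Int}
    (h : oneCell g c) : cval (setCell g c.1 c.2 v) c = v := by
  obtain ⟨hx, hy, h1⟩ := h
  have hval : val g c.1.toNat c.2.toNat = 1 := by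
    rw [← getCell_eq_val _ hx hy]; exact h1
  have hg := val_one_inGrid (g := g) (by rw [hval]; omega)
  unfold cval
  rw [getCell_eq_val _ hx hy, val_setCell hx hy, if_pos ⟨rfl, rfl, hg⟩]

theorem ones_setAll_list {m : Int} (hm : m ≠ 1) :
    ∀ (L : List (Int × Int)) (g : List (List Int)), L.Nodup →
    (∀ c ∈ L, oneCell g c) → ones (setAll g (fun c => c ∈ L) m) + L.length = ones g := by
  intro L
  induction L with
  | nil =>
    intro g _ _
    rw [setAll_empty (by simp)]
    simp
  | cons c t ih =>
    intro g hnd hone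
    have hc := hone c List.mem_cons_self
    have hset : setAll g (fun d => d ∈ c :: t) m = setAll (setCell g c.1 c.2 m) (fun d => d ∈ t) m := by
      rw [setCell_eq_setAll' hc.1 hc.2.1, setAll_comp]
      refine setAll_congr (fun i j _ => Or.inl ?_)
      simp
    rw [hset]
    have ht : ∀ d ∈ t, oneCell (setCell g c.1 c.2 m) d := by
      intro d hd
      have hdone := hone d (List.mem_cons_of_mem c hd)
      have hne : d ≠ c := fun he => (List.nodup_cons.mp hnd).1 (he ▸ hd)
      exact ⟨hdone.1, hdone.2.1,
        by rw [cval_setCell_ne ⟨hc.1, hc.2.1⟩ ⟨hdone.1, hdone.2.1⟩ hne]; exact hdone.2.2⟩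
    have := ih (setCell g c.1 c.2 m) (List.nodup_cons.mp hnd).2 ht
    have h1 := ones_setCell hm hc
    simp only [List.length_cons]
    omega

-- RP lemmas
theorem RP.trans {p : Int × Int → Prop} {s c d : Int × Int} (h1 : RP p s c) (h2 : RP p c d) : RP p s d := by
  induction h2 with
  | refl => exact h1
  | step h hadj hp ih => exact RP.step ih hadj hp

theorem RP.mono {p q : Int × Int → Prop} {s d : Int × Int} (h : ∀ x, p x → q x) (hr : RP p s d) : RP q s d := by
  induction hr with
  | refl => exact RP.refl
  | step h' hadj hp ih => exact RP.step ih hadj (h _ hp)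

theorem RP.split {p : Int × Int → Prop} (L : List (Int × Int)) {s d : Int × Int} (hr : RP p s d) :
    RP (fun x => p x ∧ x ∉ L) s d ∨ ∃ e ∈ L, RP (fun x => p x ∧ x ∉ L) e d := by
  induction hr with
  | refl => exact Or.inl RP.refl
  | @step c d h hadj hp ih =>
    by_cases hdL : d ∈ L
    · exact Or.inr ⟨d, hdL, RP.refl⟩
    · rcases ih with h1 | ⟨e, he, h1⟩
      · exact Or.inl (RP.step h1 hadj ⟨hp, hdL⟩)
      · exact Or.inr ⟨e, he, RP.step h1 hadj ⟨hp, hdL⟩⟩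

theorem RP.splitP {p S : Int × Int → Prop} {s d : Int × Int} (hr : RP p s d) :
    RP (fun x => p x ∧ ¬ S x) s d ∨ ∃ e, S e ∧ RP (fun x => p x ∧ ¬ S x) e d := by
  induction hr with
  | refl => exact Or.inl RP.refl
  | @step c d h hadj hp ih =>
    by_cases hS : S d
    · exact Or.inr ⟨d, hS, RP.refl⟩
    · rcases ih with h1 | ⟨e, he, h1⟩
      · exact Or.inl (RP.step h1 hadj ⟨hp, hS⟩)
      · exact Or.inr ⟨e, he, RP.step h1 hadj ⟨hp, hS⟩⟩

-- ===== the BFS side (A) =====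

-- the four candidate neighbours, exactly as A computes them
def cands (c : Int × Int) : List (Int × Int) :=
  [(c.1 + -1, c.2 + 0), (c.1 + 1, c.2 + 0), (c.1 + 0, c.2 + -1), (c.1 + 0, c.2 + 1)]

theorem cands_eq_nbrs (c : Int × Int) : cands c = nbrs c := by
  simp [cands, nbrs, ← sub_eq_add_neg]

theorem cands_nodup (c : Int × Int) : (cands c).Nodup := by
  simp [cands, Prod.ext_iff]

-- the inner for-k loop of A, over an arbitrary candidate list, evaluated against the start grid
theorem foldA {n m : Int} :
    ∀ (ds : List (Int × Int)) (g : List (List Int)) (acc : List (Int × Int)), ds.Pairwise (· ≠ ·) →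
    ds.foldl
      (fun (st : List (List Int) × List (Int × Int)) d =>
        if inb n d ∧ cval st.1 d = 1 then (setCell st.1 d.1 d.2 m, st.2 ++ [d]) else st)
      (g, acc)
    = (setAll g (fun c => c ∈ ds.filter (fun d => decide (inb n d ∧ cval g d = 1))) m,
       acc ++ ds.filter (fun d => decide (inb n d ∧ cval g d = 1))) := by
  intro ds
  induction ds with
  | nil =>
    intro g acc _
    simp only [List.foldl_nil, List.filter_nil, List.append_nil]
    rw [setAll_empty (by simp)]
  | cons d tl ih =>
    intro g acc hpw
    have hpw' := (List.pairwise_cons.mp hpw).2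
    have hdne := (List.pairwise_cons.mp hpw).1
    simp only [List.foldl_cons, List.filter_cons]
    by_cases hcond : inb n d ∧ cval g d = 1
    · rw [if_pos hcond]
      have hdx : 0 ≤ d.1 ∧ 0 ≤ d.2 := ⟨hcond.1.1, hcond.1.2.2.1⟩
      have hfe : ∀ e ∈ tl, (decide (inb n e ∧ cval (setCell g d.1 d.2 m) e = 1))
          = (decide (inb n e ∧ cval g e = 1)) := by
        intro e he
        apply decide_eq_decide.mpr
        constructor
        · rintro ⟨hinb, hv⟩
          refine ⟨hinb, ?_⟩
          rw [← cval_setCell_ne hdx ⟨hinb.1, hinb.2.2.1⟩ (fun hee => hdne e he (hee ▸ rfl))]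
          exact hv
        · rintro ⟨hinb, hv⟩
          refine ⟨hinb, ?_⟩
          rw [cval_setCell_ne hdx ⟨hinb.1, hinb.2.2.1⟩ (fun hee => hdne e he (hee ▸ rfl))]
          exact hv
      rw [ih (setCell g d.1 d.2 m) (acc ++ [d]) hpw', List.filter_congr hfe,
        if_pos (decide_eq_true hcond)]
      refine Prod.ext ?_ (by simp)
      simp only
      rw [setCell_eq_setAll' hdx.1 hdx.2, setAll_comp]
      refine setAll_congr (fun i j _ => Or.inl ?_)
      simp
    · rw [if_neg hcond, ih g acc hpw',
        if_neg (fun h => hcond (of_decide_eq_true h))]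

-- a path inside the shrunken grid that starts at the popped cell either stays there
-- or enters through one of the freshly marked neighbours
theorem rp_start_cases {q p : Int × Int → Prop} {N : List (Int × Int)} {c x : Int × Int}
    (hqp : ∀ z, q z → p z ∧ z ∉ N)
    (hcov : ∀ y ∈ nbrs c, p y → y ∈ N)
    (hr : RP q c x) : x = c ∨ ∃ e ∈ N, RP q e x := by
  induction hr with
  | refl => exact Or.inl rfl
  | @step y z h hadj hq ih =>
    rcases ih with hy | ⟨e, he, h'⟩
    · subst hy
      exact absurd (hcov z hadj (hqp z hq).1) (hqp z hq).2
    · exact Or.inr ⟨e, he, RP.step h' hadj hq⟩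

theorem bfs_spec {n m : Int} (hm : m ≠ 1) :
    ∀ (fuel : Nat) (g : List (List Int)) (q : List (Int × Int)),
    5 * ones g + q.length < fuel →
    (∀ c ∈ q, inb n c ∧ cval g c = m) →
    bfsF n m fuel g q = setAll g (fun d => ∃ c ∈ q, RP (oneAt n g) c d) m := by
  intro fuel
  induction fuel with
  | zero => intro g q hlt _; exact absurd hlt (by omega)
  | succ f ih =>
    intro g q hlt hq
    rcases q with _ | ⟨c, rest⟩
    · rw [setAll_empty (by simp)]
      rfl
    · have hunf : bfsF n m (f + 1) g (c :: rest)
          = bfsF n m f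
            ((cands c).foldl
              (fun (st : List (List Int) × List (Int × Int)) d =>
                if inb n d ∧ cval st.1 d = 1 then (setCell st.1 d.1 d.2 m, st.2 ++ [d]) else st)
              (g, rest)).1
            ((cands c).foldl
              (fun (st : List (List Int) × List (Int × Int)) d =>
                if inb n d ∧ cval st.1 d = 1 then (setCell st.1 d.1 d.2 m, st.2 ++ [d]) else st)
              (g, rest)).2 := rfl
      have hfold := foldA (n := n) (m := m) (cands c) g rest (cands_nodup c)
      set N := (cands c).filter (fun d => decide (inb n d ∧ cval g d = 1)) with hNdef
      have hNmem : ∀ e, e ∈ N ↔ e ∈ cands c ∧ inb n e ∧ cval g e = 1 := by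
        intro e
        simp [hNdef, List.mem_filter]
      have hNone : ∀ e ∈ N, oneCell g e := by
        intro e he
        have h1 := (hNmem e).mp he
        exact ⟨h1.2.1.1, h1.2.1.2.2.1, h1.2.2⟩
      have hNnd : N.Nodup := (cands_nodup c).filter _
      have hones := ones_setAll_list hm N g hNnd hNone
      have hcc := hq c List.mem_cons_self
      have hq' : ∀ e ∈ rest ++ N, inb n e ∧ cval (setAll g (fun d => d ∈ N) m) e = m := by
        intro e he
        rcases List.mem_append.mp he with her | heN
        · have hqe := hq e (List.mem_cons_of_mem c her)
          have hnotN : e ∉ N := by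
            intro heN
            have h1 := (hNmem e).mp heN
            rw [hqe.2] at h1
            exact hm h1.2.2
          refine ⟨hqe.1, ?_⟩
          rw [cval_setAll hqe.1.1 hqe.1.2.2.1, if_neg (fun hc => hnotN hc.2)]
          exact hqe.2
        · have h1 := hNone e heN
          have hgrid : inGrid g e.1.toNat e.2.toNat := by
            apply val_one_inGrid
            rw [← getCell_eq_val g h1.1 h1.2.1]
            have : getCell g e.1 e.2 = 1 := h1.2.2
            rw [this]; omega
          refine ⟨((hNmem e).mp heN).2.1, ?_⟩
          rw [cval_setAll h1.1 h1.2.1, if_pos ⟨hgrid, heN⟩]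
      have hmeas : 5 * ones (setAll g (fun d => d ∈ N) m) + (rest ++ N).length < f := by
        rw [List.length_append]
        simp only [List.length_cons] at hlt
        omega
      have hIH := ih (setAll g (fun d => d ∈ N) m) (rest ++ N) hmeas hq'
      rw [hunf, hfold]
      simp only
      rw [hIH, setAll_comp]
      apply setAll_congr
      intro i j hg
      by_cases hvm : val g i j = m
      · exact Or.inr hvm
      · left
        have hxnn1 : (0:Int) ≤ ((i : Nat) : Int) := Int.natCast_nonneg i
        have hxnn2 : (0:Int) ≤ ((j : Nat) : Int) := Int.natCast_nonneg j
        have hvx : cval g (((i : Nat) : Int), ((j : Nat) : Int)) = val g i j := by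
          unfold cval
          rw [getCell_eq_val g hxnn1 hxnn2]
          simp
        constructor
        · rintro (hxN | ⟨c', hc', hrp⟩)
          · have h1 := (hNmem _).mp hxN
            exact ⟨c, List.mem_cons_self,
              RP.step RP.refl (by rw [← cands_eq_nbrs]; exact h1.1) ⟨h1.2.1, h1.2.2⟩⟩
          · have hrp' : RP (oneAt n g) c' (((i : Nat) : Int), ((j : Nat) : Int)) :=
              RP.mono (fun z hz => ((oneAt_setAll hm).mp hz).1) hrp
            rcases List.mem_append.mp hc' with hcr | hcN
            · exact ⟨c', List.mem_cons_of_mem _ hcr, hrp'⟩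
            · have h1 := (hNmem c').mp hcN
              exact ⟨c, List.mem_cons_self,
                RP.trans (RP.step RP.refl (by rw [← cands_eq_nbrs]; exact h1.1) ⟨h1.2.1, h1.2.2⟩) hrp'⟩
        · rintro ⟨c0, hc0, hrp⟩
          have hsplit := RP.split N hrp
          have conv1 : ∀ {a b : Int × Int}, RP (fun z => oneAt n g z ∧ z ∉ N) a b →
              RP (oneAt n (setAll g (fun d => d ∈ N) m)) a b :=
            fun h => RP.mono (fun z hz => (oneAt_setAll hm).mpr hz) h
          rcases List.mem_cons.mp hc0 with hc0c | hc0r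
          · subst hc0c
            rcases hsplit with hL | ⟨e, heN, hL⟩
            · have hcase := rp_start_cases (p := oneAt n g) (N := N)
                (fun z hz => hz)
                (fun y hy hone => (hNmem y).mpr ⟨by rw [cands_eq_nbrs]; exact hy, hone.1, hone.2⟩)
                hL
              rcases hcase with hxc | ⟨e, heN, hL'⟩
              · exact absurd (by rw [← hvx, hxc]; exact hcc.2) hvm
              · exact Or.inr ⟨e, List.mem_append_right _ heN, conv1 hL'⟩
            · exact Or.inr ⟨e, List.mem_append_right _ heN, conv1 hL⟩
          · rcases hsplit with hL | ⟨e, heN, hL⟩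
            · exact Or.inr ⟨c0, List.mem_append_left _ hc0r, conv1 hL⟩
            · exact Or.inr ⟨e, List.mem_append_right _ heN, conv1 hL⟩

theorem afill {n m : Int} {g : List (List Int)} {s : Int × Int} (hm : m ≠ 1)
    (hs : oneAt n g s) :
    bfsF n m (5 * ones (setCell g s.1 s.2 m) + 2) (setCell g s.1 s.2 m) [s]
      = setAll g (RP (oneAt n g) s) m := by
  have hnn : 0 ≤ s.1 ∧ 0 ≤ s.2 := ⟨hs.1.1, hs.1.2.2.1⟩
  have hone : oneCell g s := ⟨hnn.1, hnn.2, hs.2⟩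
  have hq : ∀ c ∈ [s], inb n c ∧ cval (setCell g s.1 s.2 m) c = m := by
    intro c hc
    rw [List.mem_singleton] at hc
    subst hc
    exact ⟨hs.1, cval_setCell_self hone⟩
  rw [bfs_spec hm _ _ _ (by simp) hq, setCell_eq_setAll' hnn.1 hnn.2, setAll_comp]
  apply setAll_congr
  intro i j hg
  left
  have hpred : ∀ z : Int × Int, (oneAt n g z ∧ ¬ z = s) ↔
      oneAt n (setAll g (fun d => d = s) m) z := fun z => (oneAt_setAll (S := fun d => d = s) hm).symm
  constructor
  · rintro (hxs | ⟨c', hc', hrp⟩)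
    · exact hxs ▸ RP.refl
    · rw [List.mem_singleton] at hc'
      subst hc'
      exact RP.mono (fun z hz => ((oneAt_setAll hm).mp hz).1) hrp
  · intro hrp
    rcases RP.split [s] hrp with hL | ⟨e, he, hL⟩
    · refine Or.inr ⟨s, List.mem_singleton_self s, ?_⟩
      refine RP.mono (fun z hz => ?_) hL
      exact (hpred z).mp ⟨hz.1, by simpa using hz.2⟩
    · rw [List.mem_singleton] at he
      subst he
      refine Or.inr ⟨e, List.mem_singleton_self e, ?_⟩
      refine RP.mono (fun z hz => ?_) hL
      exact (hpred z).mp ⟨hz.1, by simpa using hz.2⟩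

-- ===== the recursive DFS side (B) =====

theorem oneAt_oneCell {n : Int} {g : List (List Int)} {c : Int × Int} (h : oneAt n g c) :
    oneCell g c := ⟨h.1.1, h.1.2.2.1, h.2⟩

theorem ones_fillF_le {n m : Int} (hm : m ≠ 1) :
    ∀ (fuel : Nat) (g : List (List Int)) (c : Int × Int), oneCell g c →
    ones (fillF n m fuel g c) ≤ ones g := by
  intro fuel
  induction fuel with
  | zero => intro g c _; exact Nat.le_refl _
  | succ f ih =>
    intro g c hc
    have hstep : ones (setCell g c.1 c.2 m) + 1 = ones g := ones_setCell hm hc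
    have haux : ∀ (ds : List (Int × Int)) (g0 : List (List Int)),
        ones (ds.foldl
          (fun g d => if inb n d ∧ getCell g d.1 d.2 = 1 then fillF n m f g d else g) g0)
        ≤ ones g0 := by
      intro ds
      induction ds with
      | nil => intro g0; exact Nat.le_refl _
      | cons d tl ihds =>
        intro g0
        simp only [List.foldl_cons]
        by_cases hcond : inb n d ∧ getCell g0 d.1 d.2 = 1
        · rw [if_pos hcond]
          exact le_trans (ihds _) (ih g0 d ⟨hcond.1.1, hcond.1.2.2.1, hcond.2⟩)
        · rw [if_neg hcond]
          exact ihds g0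
    calc ones (fillF n m (f + 1) g c) ≤ ones (setCell g c.1 c.2 m) :=
          haux (nbrs c) (setCell g c.1 c.2 m)
      _ ≤ ones g := by omega

-- a path inside the grid with the start cell removed either stays at the start or
-- enters through a neighbour of the start
theorem rp_start_casesP {p : Int × Int → Prop} {s x : Int × Int}
    (h : RP (fun z => p z ∧ ¬ z = s) s x) :
    x = s ∨ ∃ d ∈ nbrs s, (p d ∧ ¬ d = s) ∧ RP (fun z => p z ∧ ¬ z = s) d x := by
  induction h with
  | refl => exact Or.inl rfl
  | @step y z h hadj hp ih =>
    rcases ih with hy | ⟨d, hd, hpd, h'⟩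
    · subst hy
      exact Or.inr ⟨z, hadj, hp, RP.refl⟩
    · exact Or.inr ⟨d, hd, hpd, RP.step h' hadj hp⟩

-- the 'for nx, ny in …' loop of B: successively filling from each live neighbour
-- candidate marks the union of the reachable sets
theorem dfs_fold {n m : Int} (hm : m ≠ 1) (f : Nat)
    (ihS : ∀ (g : List (List Int)) (s : Int × Int), ones g < f → oneAt n g s →
      fillF n m f g s = setAll g (RP (oneAt n g) s) m) :
    ∀ (ds : List (Int × Int)) (g : List (List Int)), ones g < f →
    ds.foldl
      (fun g d => if inb n d ∧ getCell g d.1 d.2 = 1 then fillF n m f g d else g) g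
    = setAll g (fun x => ∃ d ∈ ds, oneAt n g d ∧ RP (oneAt n g) d x) m := by
  intro ds
  induction ds with
  | nil =>
    intro g _
    simp only [List.foldl_nil]
    rw [setAll_empty (by simp)]
  | cons d tl ih =>
    intro g hf
    simp only [List.foldl_cons]
    by_cases hcond : inb n d ∧ getCell g d.1 d.2 = 1
    · have hone : oneAt n g d := ⟨hcond.1, hcond.2⟩
      rw [if_pos hcond]
      have hle : ones (fillF n m f g d) ≤ ones g := ones_fillF_le hm f g d (oneAt_oneCell hone)
      have hfd : fillF n m f g d = setAll g (RP (oneAt n g) d) m := ihS g d hf hone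
      rw [hfd] at hle
      rw [hfd, ih _ (lt_of_le_of_lt hle hf), setAll_comp]
      apply setAll_congr
      intro i j _
      left
      constructor
      · rintro (hRd | ⟨e, he, hoe, hrp⟩)
        · exact ⟨d, List.mem_cons_self, hone, hRd⟩
        · have h1 := (oneAt_setAll hm).mp hoe
          exact ⟨e, List.mem_cons_of_mem _ he,
            h1.1, RP.mono (fun z hz => ((oneAt_setAll hm).mp hz).1) hrp⟩
      · rintro ⟨e, he, hoe, hrp⟩
        rcases List.mem_cons.mp he with he' | he'
        · subst he'
          exact Or.inl hrp
        · rcases RP.splitP (S := RP (oneAt n g) d) hrp with hL | ⟨z, hz, hL⟩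
          · by_cases hRe : RP (oneAt n g) d e
            · exact Or.inl (RP.trans hRe (RP.mono (fun z hz => hz.1) hL))
            · refine Or.inr ⟨e, he', (oneAt_setAll hm).mpr ⟨hoe, hRe⟩,
                RP.mono (fun z hz => (oneAt_setAll hm).mpr hz) hL⟩
          · exact Or.inl (RP.trans hz (RP.mono (fun z hz => hz.1) hL))
    · rw [if_neg hcond, ih g hf]
      apply setAll_congr
      intro i j _
      left
      constructor
      · rintro ⟨e, he, hoe, hrp⟩
        exact ⟨e, List.mem_cons_of_mem _ he, hoe, hrp⟩
      · rintro ⟨e, he, hoe, hrp⟩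
        rcases List.mem_cons.mp he with he' | he'
        · subst he'
          exact absurd ⟨hoe.1, hoe.2⟩ hcond
        · exact ⟨e, he', hoe, hrp⟩

theorem dfs_spec {n m : Int} (hm : m ≠ 1) :
    ∀ (fuel : Nat) (g : List (List Int)) (s : Int × Int), ones g < fuel → oneAt n g s →
    fillF n m fuel g s = setAll g (RP (oneAt n g) s) m := by
  intro fuel
  induction fuel with
  | zero => intro g s hlt _; exact absurd hlt (by omega)
  | succ f ih =>
    intro g s hlt hs
    have hone : oneCell g s := oneAt_oneCell hs
    have hg1 : ones (setCell g s.1 s.2 m) + 1 = ones g := ones_setCell hm hone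
    have hg1lt : ones (setCell g s.1 s.2 m) < f := by omega
    have hunf : fillF n m (f + 1) g s
        = (nbrs s).foldl
            (fun g d => if inb n d ∧ getCell g d.1 d.2 = 1 then fillF n m f g d else g)
            (setCell g s.1 s.2 m) := rfl
    rw [hunf, dfs_fold hm f ih (nbrs s) _ hg1lt,
      setCell_eq_setAll' hs.1.1 hs.1.2.2.1, setAll_comp]
    apply setAll_congr
    intro i j _
    left
    have hpred : ∀ z : Int × Int,
        oneAt n (setAll g (fun d => d = s) m) z ↔ oneAt n g z ∧ ¬ z = s :=
      fun z => oneAt_setAll (S := fun d => d = s) hm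
    constructor
    · rintro (hxs | ⟨d, hd, hod, hrp⟩)
      · exact hxs ▸ RP.refl
      · have h1 := (hpred d).mp hod
        exact RP.trans (RP.step RP.refl hd h1.1)
          (RP.mono (fun z hz => ((hpred z).mp hz).1) hrp)
    · intro hrp
      have havoid : RP (fun z => oneAt n g z ∧ ¬ z = s) s _ ∨
          ∃ e, e = s ∧ RP (fun z => oneAt n g z ∧ ¬ z = s) e _ :=
        RP.splitP (S := fun z => z = s) hrp
      have hsx : RP (fun z => oneAt n g z ∧ ¬ z = s) s (((i : Nat) : Int), ((j : Nat) : Int)) := by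
        rcases havoid with h | ⟨e, he, h⟩
        · exact h
        · exact he ▸ h
      rcases rp_start_casesP hsx with hxs | ⟨d, hd, hpd, h'⟩
      · exact Or.inl hxs
      · exact Or.inr ⟨d, hd, (hpred d).mpr hpd,
          RP.mono (fun z hz => (hpred z).mpr hz) h'⟩

-- ===== outer scan =====

theorem inner_eq {n : Int} {i : Int} (hi : 0 ≤ i ∧ i < n) :
    ∀ (js : List Int) (st : List (List Int) × Int), (∀ j ∈ js, 0 ≤ j ∧ j < n) → 1 ≤ st.2 →
    (js.foldl
      (fun (st : List (List Int) × Int) j =>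
        if getCell st.1 i j = 1 then
          (bfsF n (st.2 + 1) (5 * ones (setCell st.1 i j (st.2 + 1)) + 2) (setCell st.1 i j (st.2 + 1)) [(i, j)], st.2 + 1)
        else st) st)
    = (js.foldl
      (fun (st : List (List Int) × Int) j =>
        if getCell st.1 i j = 1 then
          (fillF n (st.2 + 1) (ones st.1 + 1) st.1 (i, j), st.2 + 1)
        else st) st)
    ∧ 1 ≤ (js.foldl
      (fun (st : List (List Int) × Int) j =>
        if getCell st.1 i j = 1 then
          (bfsF n (st.2 + 1) (5 * ones (setCell st.1 i j (st.2 + 1)) + 2) (setCell st.1 i j (st.2 + 1)) [(i, j)], st.2 + 1)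
        else st) st).2 := by
  intro js
  induction js with
  | nil => intro st _ hm2; exact ⟨rfl, hm2⟩
  | cons j tl jih =>
    intro st hb hm2
    have hj := hb j List.mem_cons_self
    have hb' := fun j' hj' => hb j' (List.mem_cons_of_mem _ hj')
    simp only [List.foldl_cons]
    by_cases hcell : getCell st.1 i j = 1
    · have hm : st.2 + 1 ≠ 1 := by omega
      have hone : oneAt n st.1 (i, j) := ⟨⟨hi.1, hi.2, hj.1, hj.2⟩, hcell⟩
      have hstepeq : (bfsF n (st.2 + 1) (5 * ones (setCell st.1 i j (st.2 + 1)) + 2)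
            (setCell st.1 i j (st.2 + 1)) [(i, j)], st.2 + 1)
          = (fillF n (st.2 + 1) (ones st.1 + 1) st.1 (i, j), st.2 + 1) := by
        refine Prod.ext ?_ rfl
        exact (afill hm hone).trans (dfs_spec hm (ones st.1 + 1) st.1 (i, j) (by omega) hone).symm
      rw [if_pos hcell, if_pos hcell, hstepeq]
      exact jih _ hb' (by simp; omega)
    · rw [if_neg hcell, if_neg hcell]
      exact jih st hb' hm2

theorem outer_eq {n : Int} :
    ∀ (is : List Int) (st : List (List Int) × Int),
    (∀ i ∈ is, 0 ≤ i ∧ i < n) → 1 ≤ st.2 →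
    (is.foldl
      (fun (st : List (List Int) × Int) i =>
        (PySem.List.pyRange 0 n 1).foldl
          (fun (st : List (List Int) × Int) j =>
            if getCell st.1 i j = 1 then
              (bfsF n (st.2 + 1) (5 * ones (setCell st.1 i j (st.2 + 1)) + 2) (setCell st.1 i j (st.2 + 1)) [(i, j)], st.2 + 1)
            else st) st) st)
    = (is.foldl
      (fun (st : List (List Int) × Int) i =>
        (PySem.List.pyRange 0 n 1).foldl
          (fun (st : List (List Int) × Int) j =>
            if getCell st.1 i j = 1 then
              (fillF n (st.2 + 1) (ones st.1 + 1) st.1 (i, j), st.2 + 1)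
            else st) st) st) := by
  intro is
  induction is with
  | nil => intro st _ _; rfl
  | cons i tl ih =>
    intro st hb hm2
    have hi := hb i List.mem_cons_self
    have hb' := fun i' hi' => hb i' (List.mem_cons_of_mem _ hi')
    have hjb : ∀ j ∈ PySem.List.pyRange 0 n 1, 0 ≤ j ∧ j < n := by
      intro j hj
      exact PySem.List.mem_pyRange_one.mp hj
    have hin := inner_eq (n := n) (i := i) hi (PySem.List.pyRange 0 n 1) st hjb hm2
    simp only [List.foldl_cons]
    rw [← hin.1]
    exact ih _ hb' hin.2

-- ===== VERDICT (by name: the statement is the Claim_ definition above) =====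
theorem markingIsland_spec : Claim_equal_markingIsland := by
  intro mapp n _hdom _hpre
  unfold Spec_markingIsland markingIsland markingIsland_alt
  refine congrArg Prod.fst ?_
  refine outer_eq (PySem.List.pyRange 0 n 1) (mapp, 1) ?_ (by norm_num)
  intro i hi
  exact PySem.List.mem_pyRange_one.mp hi
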